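-- pv_equiv track=rewrite | github.com/wickai/fibonacci_wave_2d | backend/matrix_lib.py | eq_rotation_repeat
-- ===== SOURCE A (Python) =====
-- from typing import Dict, List, Tuple, Any
--
-- def eq_rotation_repeat(result: List[int], base_seq: List[int]) -> bool:
--     sLen = len(base_seq)
--     if sLen == 0 or len(result) % sLen != 0:
--         return False
--     for r in range(sLen):
--         ok = True
--         for i in range(len(result)):
--             if result[i] != base_seq[(i + r) % sLen]:
--                 ok = False
--                 break
--         if ok:
--             return True
--     return False
-- ===== SOURCE B (Python) =====
-- from typing import List
--
-- def eq_rotation_repeat(result: List[int], base_seq: List[int]) -> bool: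
--     n = len(base_seq)
--     if n == 0 or len(result) % n != 0:
--         return False
--     if not result:
--         return True
--     # one pass: result must have period n
--     if not all(result[i] == result[i - n] for i in range(n, len(result))):
--         return False
--     # first block must be a rotation of base_seq: search it in the doubled sequence
--     doubled = base_seq + base_seq
--     return any(all(doubled[j + k] == result[k] for k in range(n)) for j in range(n + 1))
-- ===== Notes on version B (the rewrite author's own statement) =====
-- stated objective: alternative
-- what changed: A tries every rotation r and rescans the whole result for each; B decomposes the question into one periodicity pass over result plus a search for the first block as a window of the doubled base sequence.
import Mathlib
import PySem

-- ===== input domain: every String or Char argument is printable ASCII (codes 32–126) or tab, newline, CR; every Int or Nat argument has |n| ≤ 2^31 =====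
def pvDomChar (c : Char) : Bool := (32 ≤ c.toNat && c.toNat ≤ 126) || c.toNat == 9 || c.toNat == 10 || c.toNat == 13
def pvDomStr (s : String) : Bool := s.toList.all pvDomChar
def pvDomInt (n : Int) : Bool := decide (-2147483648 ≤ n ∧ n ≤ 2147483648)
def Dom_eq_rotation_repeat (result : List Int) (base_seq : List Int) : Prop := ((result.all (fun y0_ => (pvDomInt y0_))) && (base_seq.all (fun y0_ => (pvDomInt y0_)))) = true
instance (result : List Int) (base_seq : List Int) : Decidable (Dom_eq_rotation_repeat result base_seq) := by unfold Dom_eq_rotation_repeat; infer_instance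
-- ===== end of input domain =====

-- B replaces A's try-every-rotation scan by one periodicity pass over result plus
-- a rotation search in the doubled base sequence (objective: alternative algorithm).

-- ===== PORT A =====
def eq_rotation_repeat (result : List Int) (base_seq : List Int) : Bool :=
  if base_seq.length = 0 ∨ result.length % base_seq.length ≠ 0 then false
  else
    (List.range base_seq.length).any fun r =>
      (List.range result.length).all fun i =>
        result.getD i 0 == base_seq.getD ((i + r) % base_seq.length) 0

-- ===== PORT B =====
def eq_rotation_repeat_alt (result : List Int) (base_seq : List Int) : Bool :=
  if base_seq.length = 0 ∨ result.length % base_seq.length ≠ 0 then false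
  else if result.isEmpty then true
  else
    ((List.range' base_seq.length (result.length - base_seq.length)).all
        (fun i => result.getD i 0 == result.getD (i - base_seq.length) 0)) &&
    ((List.range (base_seq.length + 1)).any fun j =>
      (List.range base_seq.length).all fun k =>
        (base_seq ++ base_seq).getD (j + k) 0 == result.getD k 0)

-- ===== PRECONDITION & SPEC =====
def Spec_eq_rotation_repeat (result : List Int) (base_seq : List Int) (out : Bool) : Prop := out = eq_rotation_repeat_alt result base_seq
instance (result : List Int) (base_seq : List Int) (out : Bool) : Decidable (Spec_eq_rotation_repeat result base_seq out) := by unfold Spec_eq_rotation_repeat; infer_instance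

-- ===== CLAIM (what is proved, stated in full; the proofs are below) =====
def Claim_equal_eq_rotation_repeat : Prop := ∀ (result : List Int) (base_seq : List Int), Dom_eq_rotation_repeat result base_seq → Spec_eq_rotation_repeat result base_seq (eq_rotation_repeat result base_seq)

-- ===== LEMMAS AND PROOFS =====

-- element of the doubled list, reduced modulo the base length
theorem getD_doubled (b : List Int) (m : Nat) (hm : m < 2 * b.length) :
    (b ++ b).getD m 0 = b.getD (m % b.length) 0 := by
  rcases lt_or_ge m b.length with h | h
  · rw [Nat.mod_eq_of_lt h]
    exact List.getD_append b b 0 m h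
  · rw [List.getD_append_right b b 0 m h, Nat.mod_eq_sub_mod h,
      Nat.mod_eq_of_lt (by omega)]

-- a list with period n agrees with its value at the index reduced mod n
theorem periodic_mod (res : List Int) (n : Nat) (hn : 0 < n)
    (hp : ∀ i, n ≤ i → i < res.length → res.getD i 0 = res.getD (i - n) 0) :
    ∀ i, i < res.length → res.getD i 0 = res.getD (i % n) 0 := by
  intro i
  induction i using Nat.strong_induction_on with
  | _ i ih =>
    intro hi
    rcases lt_or_ge i n with h | h
    · rw [Nat.mod_eq_of_lt h]
    · rw [hp i h hi, ih (i - n) (by omega) (by omega),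
        ← Nat.mod_eq_sub_mod h]

theorem mod_shift (i j n : Nat) : (j + i % n) % n = (i + j % n) % n := by
  rw [Nat.add_mod, Nat.add_mod i, Nat.mod_mod, Nat.mod_mod, Nat.add_comm]

-- the heart: A's rotation scan ↔ B's periodicity + doubled-sequence search
theorem key (res base : List Int) (hn : 0 < base.length)
    (hmod : res.length % base.length = 0) (hne : 0 < res.length) :
    (∃ r < base.length, ∀ i < res.length,
        res.getD i 0 = base.getD ((i + r) % base.length) 0) ↔
    ((∀ i, base.length ≤ i → i < res.length →
        res.getD i 0 = res.getD (i - base.length) 0) ∧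
     ∃ j ≤ base.length, ∀ k < base.length,
        (base ++ base).getD (j + k) 0 = res.getD k 0) := by
  have hnL : base.length ≤ res.length :=
    Nat.le_of_dvd hne (Nat.dvd_of_mod_eq_zero hmod)
  constructor
  · rintro ⟨r, hr, H⟩
    refine ⟨?_, r, le_of_lt hr, ?_⟩
    · intro i hni hiL
      rw [H i hiL, H (i - base.length) (by omega)]
      congr 1
      rw [Nat.mod_eq_sub_mod (show base.length ≤ i + r by omega)]
      congr 1
      omega
    · intro k hk
      rw [getD_doubled base (r + k) (by omega), H k (by omega),
        Nat.add_comm r k]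
  · rintro ⟨hp, j, hj, HJ⟩
    refine ⟨j % base.length, Nat.mod_lt _ hn, ?_⟩
    intro i hi
    rw [periodic_mod res base.length hn hp i hi,
      ← HJ (i % base.length) (Nat.mod_lt _ hn),
      getD_doubled base (j + i % base.length)
        (by have := Nat.mod_lt i hn; omega)]
    exact congrArg (fun m => base.getD m 0) (mod_shift i j base.length)
  
-- ===== VERDICT (by name: the statement is the Claim_ definition above) =====
theorem eq_rotation_repeat_spec : Claim_equal_eq_rotation_repeat := by
  intro res base _
  unfold Spec_eq_rotation_repeat eq_rotation_repeat eq_rotation_repeat_alt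
  by_cases h : base.length = 0 ∨ res.length % base.length ≠ 0
  · rw [if_pos h, if_pos h]
  · rw [if_neg h, if_neg h]
    push Not at h
    obtain ⟨hn, hmod⟩ := h
    have hn0 : 0 < base.length := Nat.pos_of_ne_zero hn
    by_cases hres : res.isEmpty
    · rw [if_pos hres]
      rw [List.isEmpty_iff] at hres
      subst hres
      simp [List.any_eq_true, List.mem_range]
      exact ⟨0, hn0⟩
    · rw [if_neg hres]
      rw [Bool.eq_iff_iff]
      have hne : 0 < res.length := by
        rw [List.isEmpty_iff] at hres
        cases res with
        | nil => exact absurd rfl hres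
        | cons a l => simp
      have hnL : base.length ≤ res.length :=
        Nat.le_of_dvd hne (Nat.dvd_of_mod_eq_zero hmod)
      simp only [Bool.and_eq_true, List.any_eq_true, List.all_eq_true,
        List.mem_range, List.mem_range'_1, beq_iff_eq,
        Nat.add_sub_cancel' hnL, Nat.lt_add_one_iff]
      rw [key res base hn0 hmod hne]
      exact and_congr_left fun _ =>
        ⟨fun hp x hx => hp x hx.1 hx.2, fun hp i h1 h2 => hp i ⟨h1, h2⟩⟩
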